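-- pv_equiv track=rewrite | github.com/vishalseshagiri/INF553_Assignment_3 | Vishal_Seshagiri_task1_Jaccard.py | count_intersection_and_union
-- ===== SOURCE A (Python) =====
-- def count_intersection_and_union(column1, column2):
-- 	union_count = 0
-- 	intersection_count = 0
-- 	# assert set(column1).issubset(set([0, 1])) and set(column2).issubset(set([0, 1]))
-- 	for value1, value2 in zip(column1, column2):
-- 		if value1 + value2 == 2:
-- 			union_count += 1
-- 			intersection_count += 1
-- 		elif value1 + value2 == 1:
-- 			union_count += 1
-- 	return (intersection_count, union_count)
-- ===== SOURCE B (Python) =====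
-- def count_intersection_and_union(column1, column2):
--     sums = [v1 + v2 for v1, v2 in zip(column1, column2)]
--     inter = sums.count(2)
--     return (inter, sums.count(1) + inter)
-- ===== Notes on version B (the rewrite author's own statement) =====
-- stated objective: idiomatic
-- what changed: Replaces the single branch-and-add loop over two running accumulators with staged passes: materialise the list of pairwise sums once, then read intersection and union off it with list.count (count(2) and count(1)+count(2)), removing all explicit branching and accumulator state.
import Mathlib
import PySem

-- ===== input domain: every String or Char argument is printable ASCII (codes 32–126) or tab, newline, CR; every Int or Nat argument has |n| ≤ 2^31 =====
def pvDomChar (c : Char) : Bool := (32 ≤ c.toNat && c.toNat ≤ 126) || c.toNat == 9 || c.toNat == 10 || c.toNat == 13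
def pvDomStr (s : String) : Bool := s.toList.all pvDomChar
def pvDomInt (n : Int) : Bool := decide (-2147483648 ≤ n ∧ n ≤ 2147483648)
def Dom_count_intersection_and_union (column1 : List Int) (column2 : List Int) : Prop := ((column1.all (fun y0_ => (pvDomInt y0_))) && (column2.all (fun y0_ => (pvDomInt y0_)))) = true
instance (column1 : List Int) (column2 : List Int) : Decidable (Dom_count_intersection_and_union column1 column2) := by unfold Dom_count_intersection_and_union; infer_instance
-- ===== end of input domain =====

-- B replaces A's branch-and-add accumulator loop with staged passes: build the list of pairwise sums, then read both answers off it with list.count (idiomatic, same cost).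

-- ===== PORT A =====
-- state is (intersection_count, union_count); branches in A's order
def count_intersection_and_union (column1 : List Int) (column2 : List Int) : Int × Int :=
  (List.zip column1 column2).foldl
    (fun (acc : Int × Int) vv =>
      if vv.1 + vv.2 == 2 then (acc.1 + 1, acc.2 + 1)
      else if vv.1 + vv.2 == 1 then (acc.1, acc.2 + 1)
      else acc)
    (0, 0)

-- ===== PORT B =====
def count_intersection_and_union_alt (column1 : List Int) (column2 : List Int) : Int × Int :=
  let sums := (List.zip column1 column2).map (fun vv => vv.1 + vv.2)
  let inter := PySem.List.count sums 2
  (inter, PySem.List.count sums 1 + inter)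

-- ===== PRECONDITION & SPEC =====
def Spec_count_intersection_and_union (column1 : List Int) (column2 : List Int) (out : Int × Int) : Prop := out = count_intersection_and_union_alt column1 column2
instance (column1 : List Int) (column2 : List Int) (out : Int × Int) : Decidable (Spec_count_intersection_and_union column1 column2 out) := by unfold Spec_count_intersection_and_union; infer_instance

-- ===== CLAIM =====
def Claim_equal_count_intersection_and_union : Prop := ∀ (column1 : List Int) (column2 : List Int), Dom_count_intersection_and_union column1 column2 → Spec_count_intersection_and_union column1 column2 (count_intersection_and_union column1 column2)

-- ===== LEMMAS AND PROOFS =====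

-- A's fold, characterised by the counts of 1s and 2s among the pairwise sums
theorem pvA_fold (l : List (Int × Int)) (i u : Int) :
    l.foldl
      (fun (acc : Int × Int) vv =>
        if vv.1 + vv.2 == 2 then (acc.1 + 1, acc.2 + 1)
        else if vv.1 + vv.2 == 1 then (acc.1, acc.2 + 1)
        else acc)
      (i, u)
    = (i + ((l.map (fun p => p.1 + p.2)).count 2 : Int),
       u + ((l.map (fun p => p.1 + p.2)).count 1 : Int) + ((l.map (fun p => p.1 + p.2)).count 2 : Int)) := by
  induction l generalizing i u with
  | nil => simp
  | cons hd tl ih =>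
    rw [List.foldl_cons]
    by_cases h2 : hd.1 + hd.2 = 2
    · rw [if_pos (by simp [h2]), ih]
      simp [h2, Prod.ext_iff]
      omega
    · rw [if_neg (by simp [h2])]
      by_cases h1 : hd.1 + hd.2 = 1
      · rw [if_pos (by simp [h1]), ih]
        simp [h1, Prod.ext_iff]
        omega
      · rw [if_neg (by simp [h1]), ih]
        simp [h1, h2]

-- ===== VERDICT =====
theorem count_intersection_and_union_spec : Claim_equal_count_intersection_and_union := by
  intro column1 column2 _
  unfold Spec_count_intersection_and_union count_intersection_and_union count_intersection_and_union_alt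
  rw [pvA_fold]
  simp [PySem.List.count_eq]
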